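-- pv_equiv track=rewrite | github.com/TommyFurgi/introduction-to-computer-science | zestaw7/7.15.py | warunek
-- ===== SOURCE A (Python) =====
-- def warunek(liczba):
--     jed=0
--     dwoj=0
--     while liczba>0:
--         if liczba%3==1:
--             jed+=1
--         elif liczba%3==2:
--             dwoj+=1
--         liczba//=3
--     if dwoj < jed:
--         return False
--     return True
-- ===== SOURCE B (Python) =====
-- def warunek(liczba):
--     # Recursively fold the base-3 digits into one signed balance:
--     # a digit 2 contributes +1, a digit 1 contributes -1, a digit 0 nothing.
--     # twos >= ones  iff  the total balance is >= 0.
--     def bal(n):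
--         if n <= 0:
--             return 0
--         return bal(n // 3) + (0, -1, 1)[n % 3]
--     return bal(liczba) >= 0
-- ===== Notes on version B (the rewrite author's own statement) =====
-- stated objective: alternative
-- what changed: Replaces A's iterative twin-counter loop and final comparison by a recursive fold that maps each base-3 digit through a signed contribution table (+1 for 2, -1 for 1) into a single balance, returning balance >= 0.
import Mathlib
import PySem

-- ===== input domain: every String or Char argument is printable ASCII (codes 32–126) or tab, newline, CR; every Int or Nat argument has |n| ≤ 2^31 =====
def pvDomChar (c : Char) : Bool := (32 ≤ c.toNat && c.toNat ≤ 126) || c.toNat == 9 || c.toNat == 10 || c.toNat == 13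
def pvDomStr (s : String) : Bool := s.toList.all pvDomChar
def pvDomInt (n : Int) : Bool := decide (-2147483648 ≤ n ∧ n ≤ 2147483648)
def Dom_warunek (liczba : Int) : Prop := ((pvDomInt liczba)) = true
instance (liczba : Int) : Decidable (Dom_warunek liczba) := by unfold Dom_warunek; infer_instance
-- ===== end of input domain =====

-- B replaces A's iterative twin-counter loop by a recursive fold of the base-3 digits
-- through a signed contribution table into one balance (objective: alternative).

theorem pvFloordiv3_toNat_lt (n : Int) (h : n > 0) :
    (PySem.Int.floordiv n 3).toNat < n.toNat := by
  rw [PySem.Int.floordiv_eq_ediv_of_pos (by omega)]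
  omega

-- ===== PORT A =====
-- the while-loop of A, state = (liczba, jed, dwoj), followed by A's final if
def warunekGo (liczba jed dwoj : Int) : Bool :=
  if liczba > 0 then
    if PySem.Int.mod liczba 3 = 1 then
      warunekGo (PySem.Int.floordiv liczba 3) (jed + 1) dwoj
    else if PySem.Int.mod liczba 3 = 2 then
      warunekGo (PySem.Int.floordiv liczba 3) jed (dwoj + 1)
    else
      warunekGo (PySem.Int.floordiv liczba 3) jed dwoj
  else
    if dwoj < jed then false else true
termination_by liczba.toNat
decreasing_by all_goals exact pvFloordiv3_toNat_lt _ (by omega)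

def warunek (liczba : Int) : Bool := warunekGo liczba 0 0

-- ===== PORT B =====
-- B's recursive helper bal; the tuple lookup (0, -1, 1)[n % 3] is ported with pyGet?
-- and getD 0 (exact: n % 3 is always in range 0..2 when the branch is taken).
def warunekBal (n : Int) : Int :=
  if n ≤ 0 then 0
  else warunekBal (PySem.Int.floordiv n 3)
        + (PySem.List.pyGet? [(0 : Int), -1, 1] (PySem.Int.mod n 3)).getD 0
termination_by n.toNat
decreasing_by exact pvFloordiv3_toNat_lt _ (by omega)

def warunek_alt (liczba : Int) : Bool := decide (0 ≤ warunekBal liczba)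

-- ===== PRECONDITION & SPEC =====
def Spec_warunek (liczba : Int) (out : Bool) : Prop := out = warunek_alt liczba
instance (liczba : Int) (out : Bool) : Decidable (Spec_warunek liczba out) := by unfold Spec_warunek; infer_instance

-- ===== CLAIM =====
def Claim_equal_warunek : Prop := ∀ (liczba : Int), Dom_warunek liczba → Spec_warunek liczba (warunek liczba)

-- ===== LEMMAS AND PROOFS =====
theorem warunekGo_eq_bal (liczba jed dwoj : Int) :
    warunekGo liczba jed dwoj = decide (jed ≤ dwoj + warunekBal liczba) := by
  fun_induction warunekGo liczba jed dwoj with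
  | case1 n j d hpos h1 ih =>
    rw [ih]
    conv_rhs => rw [warunekBal, if_neg (by omega)]
    rw [decide_eq_decide, h1]
    simp [PySem.List.pyGet?, PySem.List.pyIdx?]
    omega
  | case2 n j d hpos h1 h2 ih =>
    rw [ih]
    conv_rhs => rw [warunekBal, if_neg (by omega)]
    rw [decide_eq_decide, h2]
    simp [PySem.List.pyGet?, PySem.List.pyIdx?]
    omega
  | case3 n j d hpos h1 h2 ih =>
    have h0 : PySem.Int.mod n 3 = 0 := by
      rw [PySem.Int.mod_eq_emod_of_pos (by norm_num)] at h1 h2 ⊢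
      omega
    rw [ih]
    conv_rhs => rw [warunekBal, if_neg (by omega)]
    rw [decide_eq_decide, h0]
    simp [PySem.List.pyGet?, PySem.List.pyIdx?]
  | case4 n j d hpos hlt =>
    conv_rhs => rw [warunekBal, if_pos (by omega)]
    simp
    omega
  | case5 n j d hpos hlt =>
    conv_rhs => rw [warunekBal, if_pos (by omega)]
    simp
    omega

-- ===== VERDICT =====
theorem warunek_spec : Claim_equal_warunek := by
  intro liczba _
  unfold Spec_warunek warunek warunek_alt
  rw [warunekGo_eq_bal]
  simp
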